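-- pv_equiv track=rewrite | github.com/mkillah/cognitiveScripts | scriptMining.py | seqMining
-- ===== SOURCE A (Python) =====
-- def is_consecutive_subsequence(subsequence:list, sequence:list) -> bool:
--     '''
--     c
--     :param subsequence: list of attributes
--     :param sequence: list of attributes
--     :return: bool
--     '''
--
--     sub_len = len(subsequence)
--     seq_len = len(sequence)
--
--     if sub_len > seq_len:
--         return False
--
--     for i in range(seq_len - sub_len + 1):
--         if sequence[i:i + sub_len] == subsequence:
--             return True
--
--     return False
--
-- def seqMining(seq1:list, seq2:list) -> list:
--     '''
--     The function is used to mine a script, a sequence of the successive list of attributes.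
--     :param seq1: list of attributes
--     :param seq2: list of attributes
--     :return: all successive chunks as intersection of input lists
--     '''
--
--     minedSeqs = []
--
--     for n in seq1:
--         # setting and re-setting indHelper
--         indHelper = seq1.index(n)
--         chunks = []
--         subsequence = [n]
--         while is_consecutive_subsequence(subsequence, seq2):
--
--             # get only subsequence that has number of elements greater than 1
--             if len(subsequence) > 1:
--                 chunks.append(subsequence)
--
--             # adding an index to relative indHelper
--             indHelper += 1
--
--             # if there is next element of sequence
--             if indHelper <= len(seq1) - 1:
--                 nextElem = seq1[indHelper]
--                 subsequence = subsequence + [nextElem]  # extend subsequence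
--             else:
--                 break
--         for chunk in chunks:
--             if (len(chunk) > 0) and (chunk not in minedSeqs):
--                 minedSeqs.append(chunk)
--
--     return minedSeqs
-- ===== SOURCE B (Python) =====
-- def seqMining(seq1: list, seq2: list) -> list:
--     """Incremental matching: for each distinct start value, track the set of
--     positions in seq2 where the growing chunk still matches, extending one
--     element at a time (O(n*m) instead of rescanning seq2 for every prefix)."""
--     result = []
--     seen = set()
--     for i, x in enumerate(seq1):
--         if x in seen:
--             continue
--         seen.add(x)
--         positions = [p for p, v in enumerate(seq2) if v == x]
--         L = 1
--         while positions and i + L < len(seq1):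
--             nxt = seq1[i + L]
--             positions = [p for p in positions if p + L < len(seq2) and seq2[p + L] == nxt]
--             if positions:
--                 L += 1
--                 result.append(seq1[i:i + L])
--             else:
--                 break
--     return result
-- ===== Notes on version B (the rewrite author's own statement) =====
-- stated objective: faster
-- what changed: Instead of rescanning seq2 for every grown prefix (and calling seq1.index per element), B makes one pass over seq1's first occurrences and incrementally maintains the set of seq2 positions where the current chunk matches, extending it one element at a time; duplicate starts are skipped via a seen-set so no dedup membership scan over the result is needed.
import Mathlib
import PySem

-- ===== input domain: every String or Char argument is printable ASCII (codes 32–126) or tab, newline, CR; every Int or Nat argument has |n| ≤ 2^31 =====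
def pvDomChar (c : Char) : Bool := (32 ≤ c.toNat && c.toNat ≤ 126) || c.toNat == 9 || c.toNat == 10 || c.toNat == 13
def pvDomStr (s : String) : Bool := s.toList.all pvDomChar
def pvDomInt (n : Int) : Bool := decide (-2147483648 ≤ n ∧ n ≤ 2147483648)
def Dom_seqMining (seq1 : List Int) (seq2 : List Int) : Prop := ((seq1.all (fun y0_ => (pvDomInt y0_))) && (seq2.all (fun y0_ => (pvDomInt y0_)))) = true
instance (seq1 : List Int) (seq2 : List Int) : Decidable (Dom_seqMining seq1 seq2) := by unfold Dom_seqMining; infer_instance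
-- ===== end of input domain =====

-- B replaces A's per-prefix rescans of seq2 (and per-element seq1.index calls) by a single pass that
-- incrementally tracks the seq2 match positions of the growing chunk; return values are proved equal.

-- ===== PORT A =====
def pvIsConsSub (subsequence sequence : List Int) : Bool :=
  let subLen : Int := subsequence.length
  let seqLen : Int := sequence.length
  if subLen > seqLen then false
  else (PySem.List.pyRange 0 (seqLen - subLen + 1) 1).any (fun i =>
    PySem.List.slice sequence (some i) (some (i + subLen)) == subsequence)

def pvWhileA (seq1 seq2 subsequence : List Int) (indHelper : Nat) (chunks : List (List Int)) : List (List Int) :=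
  if pvIsConsSub subsequence seq2 then
    let chunks' := if subsequence.length > 1 then chunks ++ [subsequence] else chunks
    let ih := indHelper + 1
    if h : (ih : Int) ≤ (seq1.length : Int) - 1 then
      pvWhileA seq1 seq2 (subsequence ++ [PySem.List.pyGetD seq1 (ih : Int) 0]) ih chunks'
    else chunks'
  else chunks
termination_by seq1.length - indHelper
decreasing_by omega

def seqMining (seq1 : List Int) (seq2 : List Int) : List (List Int) :=
  seq1.foldl (fun minedSeqs n =>
    let indHelper := (PySem.List.index? seq1 n).getD 0
    let chunks := pvWhileA seq1 seq2 [n] indHelper []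
    chunks.foldl (fun ms chunk =>
      if decide (0 < chunk.length) && !(ms.contains chunk) then ms ++ [chunk] else ms) minedSeqs) []

-- ===== PORT B =====
def pvWhileB (seq1 seq2 : List Int) (i : Int) (L : Nat) (positions : List Int) (res : List (List Int)) : List (List Int) :=
  if h : positions ≠ [] ∧ i + L < (seq1.length : Int) then
    let nxt := PySem.List.pyGetD seq1 (i + L) 0
    let positions' := positions.filter (fun p =>
      decide (p + L < (seq2.length : Int)) && (PySem.List.pyGetD seq2 (p + L) 0 == nxt))
    if positions' ≠ [] then
      pvWhileB seq1 seq2 i (L + 1) positions' (res ++ [PySem.List.slice seq1 (some i) (some (i + L + 1))])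
    else res
  else res
termination_by ((seq1.length : Int) - i - L).toNat
decreasing_by omega

def seqMining_alt (seq1 : List Int) (seq2 : List Int) : List (List Int) :=
  ((PySem.List.enumerate seq1).foldl (fun (st : PySem.Set Int × List (List Int)) ix =>
      if PySem.Set.contains st.1 ix.2 then st
      else
        let positions := ((PySem.List.enumerate seq2).filter (fun pv => pv.2 == ix.2)).map (fun pv => pv.1)
        (PySem.Set.add st.1 ix.2, pvWhileB seq1 seq2 ix.1 1 positions st.2))
    (PySem.Set.empty, [])).2

-- ===== PRECONDITION & SPEC =====
def Spec_seqMining (seq1 : List Int) (seq2 : List Int) (out : List (List Int)) : Prop := out = seqMining_alt seq1 seq2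
instance (seq1 : List Int) (seq2 : List Int) (out : List (List Int)) : Decidable (Spec_seqMining seq1 seq2 out) := by unfold Spec_seqMining; infer_instance

-- ===== CLAIM (what is proved, stated in full; the proofs are below) =====
def Claim_equal_seqMining : Prop := ∀ (seq1 : List Int) (seq2 : List Int), Dom_seqMining seq1 seq2 → Spec_seqMining seq1 seq2 (seqMining seq1 seq2)

-- ===== LEMMAS AND PROOFS =====

def pvPref (s : List Int) (i L : Nat) : List Int := (s.drop i).take L

def pvChain (seq1 seq2 : List Int) (i L : Nat) : List (List Int) :=
  if pvPref seq1 i L <:+: seq2 then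
    (if 1 < L then [pvPref seq1 i L] else []) ++
    (if h : i + L < seq1.length then pvChain seq1 seq2 i (L + 1) else [])
  else []
termination_by seq1.length - (i + L)

def pvAllPos (seq1 seq2 : List Int) (i L : Nat) : List Int :=
  ((PySem.List.enumerate seq2).filter (fun pv =>
    PySem.List.slice seq2 (some pv.1) (some (pv.1 + L)) == pvPref seq1 i L)).map (fun pv => pv.1)

lemma pv_infix_char (sub xs : List Int) :
    sub <:+: xs ↔ ∃ k : Nat, k + sub.length ≤ xs.length ∧ (xs.drop k).take sub.length = sub := by
  constructor
  · rintro ⟨s, t, rfl⟩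
    refine ⟨s.length, by simp, ?_⟩
    simp
  · rintro ⟨k, hk, h⟩
    refine ⟨xs.take k, (xs.drop k).drop sub.length, ?_⟩
    conv_rhs => rw [← List.take_append_drop k xs, ← List.take_append_drop sub.length (xs.drop k)]
    rw [h, List.append_assoc]

lemma pv_pref_len {s : List Int} {i L : Nat} (h : i + L ≤ s.length) : (pvPref s i L).length = L := by
  simp [pvPref]; omega

lemma pv_pref_one {s : List Int} {i : Nat} (h : i < s.length) : pvPref s i 1 = [s[i]] := by
  unfold pvPref
  rw [List.take_one, List.head?_drop]
  simp [List.getElem?_eq_getElem h]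

lemma pv_pref_snoc {s : List Int} {i L : Nat} (h : i + L < s.length) :
    pvPref s i L ++ [s[i + L]] = pvPref s i (L + 1) := by
  unfold pvPref
  rw [List.take_succ]
  congr 1
  rw [List.getElem?_drop]
  simp [List.getElem?_eq_getElem h]

lemma pv_take_head (n : Nat) (l : List Int) (h : 1 ≤ n) : (l.take n).head? = l.head? := by
  cases n with
  | zero => omega
  | succ m => cases l <;> simp

lemma pv_pref_head {s : List Int} {i L : Nat} (h1 : 1 ≤ L) (h : i < s.length) :
    (pvPref s i L).head? = some s[i] := by
  unfold pvPref
  rw [pv_take_head _ _ h1, List.head?_drop, List.getElem?_eq_getElem h]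

lemma pv_isConsSub_eq (sub seq2 : List Int) : pvIsConsSub sub seq2 = decide (sub <:+: seq2) := by
  unfold pvIsConsSub
  by_cases hinf : sub <:+: seq2
  · have hlen := hinf.length_le
    rw [if_neg (by push_cast; omega), decide_eq_true hinf, List.any_eq_true]
    obtain ⟨k, hk, hdt⟩ := (pv_infix_char sub seq2).mp hinf
    refine ⟨(k : Int), ?_, ?_⟩
    · rw [PySem.List.mem_pyRange_one]; push_cast; omega
    · simp only [beq_iff_eq]
      rw [PySem.List.slice_toNat seq2 (a:=(k:Int)) (b:=(k:Int)+(sub.length:Int)) (by omega) (by omega)]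
      have h2 : ((k:Int) + (sub.length:Int)).toNat - (k:Int).toNat = sub.length := by omega
      rw [h2]; exact hdt
  · rw [decide_eq_false hinf]
    by_cases hlen : sub.length > seq2.length
    · rw [if_pos (by push_cast; omega)]
    · push_neg at hlen
      rw [if_neg (by push_cast; omega), List.any_eq_false]
      intro i hi
      rw [PySem.List.mem_pyRange_one] at hi
      simp only [beq_iff_eq]
      intro hslice
      apply hinf
      rw [pv_infix_char]
      rw [PySem.List.slice_toNat seq2 (a:=i) (b:=i+(sub.length:Int)) (by omega) (by omega)] at hslice
      refine ⟨i.toNat, ?_, ?_⟩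
      · have hl2 : ((seq2.drop i.toNat).take ((i + ↑sub.length).toNat - i.toNat)).length = sub.length := by rw [hslice]
        simp at hl2; omega
      · have h3 : (i + (sub.length:Int)).toNat - i.toNat = sub.length := by omega
        rwa [h3] at hslice

lemma pv_whileA_eq_chain (seq1 seq2 : List Int) (i : Nat) :
    ∀ n L chunks, 1 ≤ L → i + L ≤ seq1.length → seq1.length - (i + L) = n →
    pvWhileA seq1 seq2 (pvPref seq1 i L) (i + L - 1) chunks = chunks ++ pvChain seq1 seq2 i L := by
  intro n
  induction n with
  | zero =>
    intro L chunks h1 h2 hn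
    rw [pvWhileA, pvChain, pv_isConsSub_eq]
    by_cases hinf : pvPref seq1 i L <:+: seq2
    · rw [decide_eq_true hinf, if_pos rfl]
      simp only [pv_pref_len h2]
      rw [dif_neg (by push_cast; omega), dif_neg (by omega)]
      split <;> simp
    · rw [decide_eq_false hinf, if_neg (by simp), if_neg hinf]
      simp
  | succ n ih =>
    intro L chunks h1 h2 hn
    rw [pvWhileA, pvChain, pv_isConsSub_eq]
    by_cases hinf : pvPref seq1 i L <:+: seq2
    · rw [decide_eq_true hinf, if_pos rfl]
      simp only [pv_pref_len h2]
      have hlt : i + L < seq1.length := by omega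
      rw [dif_pos (by push_cast; omega), dif_pos hlt]
      simp only [show i + L - 1 + 1 = i + L from by omega]
      rw [PySem.List.pyGetD_natCast]
      rw [List.getD_eq_getElem _ _ hlt, pv_pref_snoc hlt]
      have := ih (L + 1) (if 1 < L then chunks ++ [pvPref seq1 i L] else chunks) (by omega) (by omega) (by omega)
      simp only [show i + (L + 1) - 1 = i + L from by omega] at this
      rw [if_pos hinf]
      exact this.trans (by split <;> simp)
    · rw [decide_eq_false hinf, if_neg (by simp), if_neg hinf]
      simp

lemma pv_allPos_ne_nil_iff (seq1 seq2 : List Int) (i L : Nat) (h1 : 1 ≤ L) (h2 : i + L ≤ seq1.length) :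
    pvAllPos seq1 seq2 i L ≠ [] ↔ pvPref seq1 i L <:+: seq2 := by
  unfold pvAllPos
  simp only [ne_eq, List.map_eq_nil_iff, List.filter_eq_nil_iff, not_forall]
  constructor
  · rintro ⟨pv, hmem, hP⟩
    rw [PySem.List.mem_enumerate_iff] at hmem
    obtain ⟨k, hk, rfl⟩ := hmem
    simp only [not_not, zero_add, beq_iff_eq] at hP
    rw [PySem.List.slice_natCast_add] at hP
    have hlen : ((seq2.drop k).take L).length = L := by rw [hP, pv_pref_len h2]
    simp at hlen
    rw [pv_infix_char]
    exact ⟨k, by rw [pv_pref_len h2]; omega, by rw [pv_pref_len h2]; exact hP⟩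
  · intro hinf
    obtain ⟨k, hk, hdt⟩ := (pv_infix_char _ _).mp hinf
    rw [pv_pref_len h2] at hk hdt
    refine ⟨((k : Int), seq2[k]'(by omega)), ?_, ?_⟩
    · rw [PySem.List.mem_enumerate_iff]
      exact ⟨k, by omega, by simp⟩
    · simp only [not_not, beq_iff_eq]
      rw [PySem.List.slice_natCast_add]
      exact hdt

lemma pv_allPos_step (seq1 seq2 : List Int) (i L : Nat) (h : i + L < seq1.length) :
    (pvAllPos seq1 seq2 i L).filter (fun p =>
      decide (p + L < (seq2.length : Int)) && (PySem.List.pyGetD seq2 (p + L) 0 == PySem.List.pyGetD seq1 ((i : Int) + L) 0)) =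
    pvAllPos seq1 seq2 i (L + 1) := by
  unfold pvAllPos
  rw [List.filter_map, List.filter_filter]
  congr 1
  apply List.filter_congr
  intro pv hmem
  rw [PySem.List.mem_enumerate_iff] at hmem
  obtain ⟨k, hk, rfl⟩ := hmem
  simp only [zero_add, Function.comp_apply]
  have hnxt : PySem.List.pyGetD seq1 ((i : Int) + L) 0 = seq1[i + L] := by
    rw [show ((i : Int) + L) = ((i + L : Nat) : Int) by push_cast; ring, PySem.List.pyGetD_natCast,
      List.getD_eq_getElem _ _ h]
  rw [hnxt]
  by_cases hkL : k + L < seq2.length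
  · have hd2 : PySem.List.pyGetD seq2 ((k : Int) + L) 0 = seq2[k + L] := by
      rw [show ((k : Int) + L) = ((k + L : Nat) : Int) by push_cast; ring, PySem.List.pyGetD_natCast,
        List.getD_eq_getElem _ _ hkL]
    rw [hd2, Bool.eq_iff_iff]
    simp only [Bool.and_eq_true, decide_eq_true_eq, beq_iff_eq]
    rw [PySem.List.slice_natCast_add, PySem.List.slice_natCast_add]
    constructor
    · rintro ⟨⟨hlt, hx⟩, hb⟩
      rw [show pvPref seq1 i (L+1) = pvPref seq1 i L ++ [seq1[i+L]] from (pv_pref_snoc h).symm,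
          show (seq2.drop k).take (L+1) = (seq2.drop k).take L ++ [seq2[k+L]] from (pv_pref_snoc (s := seq2) hkL).symm]
      rw [hb, hx]
    · intro heq
      rw [show pvPref seq1 i (L+1) = pvPref seq1 i L ++ [seq1[i+L]] from (pv_pref_snoc h).symm,
          show (seq2.drop k).take (L+1) = (seq2.drop k).take L ++ [seq2[k+L]] from (pv_pref_snoc (s := seq2) hkL).symm] at heq
      have hlen1 : ((seq2.drop k).take L).length = (pvPref seq1 i L).length := by
        rw [pv_pref_len (by omega)]; simp; omega
      obtain ⟨ha, hb⟩ := List.append_inj heq (by simpa using hlen1)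
      simp at hb
      exact ⟨⟨by push_cast; omega, hb⟩, ha⟩
  · have : decide ((k:Int) + L < (seq2.length : Int)) = false := by
      rw [decide_eq_false_iff_not]; push_cast; omega
    rw [this, Bool.false_and, Bool.false_and]
    symm
    rw [beq_eq_false_iff_ne]
    intro heq
    rw [PySem.List.slice_natCast_add] at heq
    have hlen2 := congrArg List.length heq
    rw [pv_pref_len (by omega)] at hlen2
    simp at hlen2
    omega

lemma pv_allPos_one (seq1 seq2 : List Int) (i : Nat) (h : i < seq1.length) :
    ((PySem.List.enumerate seq2).filter (fun pv => pv.2 == seq1[i])).map (fun pv => pv.1) =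
    pvAllPos seq1 seq2 i 1 := by
  unfold pvAllPos
  congr 1
  apply List.filter_congr
  intro pv hmem
  rw [PySem.List.mem_enumerate_iff] at hmem
  obtain ⟨k, hk, rfl⟩ := hmem
  simp only [zero_add]
  rw [PySem.List.slice_natCast_add]
  rw [pv_pref_one h]
  have hx : List.take 1 (List.drop k seq2) = [seq2[k]] := pv_pref_one (s := seq2) hk
  rw [hx, Bool.eq_iff_iff]
  simp

lemma pv_whileB_eq_chain (seq1 seq2 : List Int) (i : Nat) :
    ∀ n L res, 1 ≤ L → i + L ≤ seq1.length → seq1.length - (i + L) = n →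
    pvWhileB seq1 seq2 (i : Int) L (pvAllPos seq1 seq2 i L) res =
      res ++ (if i + L < seq1.length ∧ pvPref seq1 i L <:+: seq2 then pvChain seq1 seq2 i (L + 1) else []) := by
  intro n
  induction n with
  | zero =>
    intro L res h1 h2 hn
    rw [pvWhileB, dif_neg (by push_cast; omega), if_neg (by omega)]
    simp
  | succ n ih =>
    intro L res h1 h2 hn
    have hlt : i + L < seq1.length := by omega
    by_cases hinf : pvPref seq1 i L <:+: seq2
    · have hne : pvAllPos seq1 seq2 i L ≠ [] := (pv_allPos_ne_nil_iff _ _ _ _ h1 h2).mpr hinf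
      rw [pvWhileB, dif_pos ⟨hne, by push_cast; omega⟩]
      simp only [pv_allPos_step seq1 seq2 i L hlt]
      by_cases hinf2 : pvPref seq1 i (L + 1) <:+: seq2
      · have hne2 : pvAllPos seq1 seq2 i (L + 1) ≠ [] :=
          (pv_allPos_ne_nil_iff _ _ _ _ (by omega) (by omega)).mpr hinf2
        rw [if_pos hne2]
        have hsl : PySem.List.slice seq1 (some (i : Int)) (some ((i : Int) + L + 1)) = pvPref seq1 i (L + 1) := by
          rw [show ((i : Int) + L + 1) = ((i : Int) + ((L + 1 : Nat) : Int)) by push_cast; ring]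
          exact PySem.List.slice_natCast_add seq1 i (L + 1)
        rw [hsl, ih (L + 1) (res ++ [pvPref seq1 i (L + 1)]) (by omega) (by omega) (by omega)]
        conv_rhs => rw [if_pos ⟨hlt, hinf⟩, pvChain, if_pos hinf2, if_pos (show 1 < L + 1 by omega)]
        by_cases h3 : i + (L + 1) < seq1.length
        · rw [if_pos ⟨h3, hinf2⟩, dif_pos h3]; simp
        · rw [if_neg (fun hc => h3 hc.1), dif_neg h3]; simp
      · have hne2 : ¬ (pvAllPos seq1 seq2 i (L + 1) ≠ []) := by
          rw [ne_eq, not_not]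
          by_contra hc
          exact hinf2 ((pv_allPos_ne_nil_iff _ _ _ _ (by omega) (by omega)).mp hc)
        rw [if_neg hne2]
        conv_rhs => rw [if_pos ⟨hlt, hinf⟩, pvChain, if_neg hinf2]
        simp
    · have hn0 : pvAllPos seq1 seq2 i L = [] := by
        by_contra hc
        exact hinf ((pv_allPos_ne_nil_iff _ _ _ _ h1 h2).mp hc)
      rw [pvWhileB, dif_neg (by simp [hn0]), if_neg (fun hc => hinf hc.2)]
      simp

lemma pv_chain_facts (seq1 seq2 : List Int) (i : Nat) :
    ∀ n L, 1 ≤ L → i + L ≤ seq1.length → seq1.length - (i + L) = n →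
    ∀ c ∈ pvChain seq1 seq2 i L, c.head? = some (seq1.getD i 0) ∧ 2 ≤ c.length ∧ L ≤ c.length := by
  intro n
  induction n with
  | zero =>
    intro L h1 h2 hn c hc
    rw [pvChain] at hc
    by_cases hinf : pvPref seq1 i L <:+: seq2
    · rw [if_pos hinf, dif_neg (by omega)] at hc
      rcases List.mem_append.mp hc with h | h
      · by_cases hL : 1 < L
        · rw [if_pos hL] at h
          simp at h
          subst h
          refine ⟨?_, by rw [pv_pref_len h2]; omega, by rw [pv_pref_len h2]⟩
          rw [pv_pref_head h1 (by omega), List.getD_eq_getElem _ _ (by omega)]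
        · rw [if_neg hL] at h; simp at h
      · simp at h
    · rw [if_neg hinf] at hc; simp at hc
  | succ n ih =>
    intro L h1 h2 hn c hc
    rw [pvChain] at hc
    by_cases hinf : pvPref seq1 i L <:+: seq2
    · rw [if_pos hinf] at hc
      rcases List.mem_append.mp hc with h | h
      · by_cases hL : 1 < L
        · rw [if_pos hL] at h
          simp at h
          subst h
          refine ⟨?_, by rw [pv_pref_len h2]; omega, by rw [pv_pref_len h2]⟩
          rw [pv_pref_head h1 (by omega), List.getD_eq_getElem _ _ (by omega)]
        · rw [if_neg hL] at h; simp at h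
      · by_cases h3 : i + L < seq1.length
        · rw [dif_pos h3] at h
          have := ih (L + 1) (by omega) (by omega) (by omega) c h
          exact ⟨this.1, this.2.1, by omega⟩
        · rw [dif_neg h3] at h; simp at h
    · rw [if_neg hinf] at hc; simp at hc

lemma pv_chain_nodup (seq1 seq2 : List Int) (i : Nat) :
    ∀ n L, 1 ≤ L → i + L ≤ seq1.length → seq1.length - (i + L) = n →
    (pvChain seq1 seq2 i L).Nodup := by
  intro n
  induction n with
  | zero =>
    intro L h1 h2 hn
    rw [pvChain]
    by_cases hinf : pvPref seq1 i L <:+: seq2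
    · rw [if_pos hinf, dif_neg (by omega)]
      split <;> simp
    · rw [if_neg hinf]; simp
  | succ n ih =>
    intro L h1 h2 hn
    rw [pvChain]
    by_cases hinf : pvPref seq1 i L <:+: seq2
    · rw [if_pos hinf]
      by_cases h3 : i + L < seq1.length
      · rw [dif_pos h3]
        have hnd := ih (L + 1) (by omega) (by omega) (by omega)
        by_cases hL : 1 < L
        · rw [if_pos hL]
          rw [List.singleton_append, List.nodup_cons]
          refine ⟨fun hmem => ?_, hnd⟩
          have := (pv_chain_facts seq1 seq2 i n (L + 1) (by omega) (by omega) (by omega) _ hmem).2.2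
          rw [pv_pref_len h2] at this
          omega
        · rw [if_neg hL]; simpa using hnd
      · rw [dif_neg h3]
        split <;> simp
    · rw [if_neg hinf]; simp

lemma pv_chunksB (seq1 seq2 : List Int) (i : Nat) (h : i < seq1.length) (x : Int) (hx : seq1[i] = x)
    (res : List (List Int)) :
    pvWhileB seq1 seq2 (i : Int) 1 (((PySem.List.enumerate seq2).filter (fun pv => pv.2 == x)).map (fun pv => pv.1)) res
      = res ++ pvChain seq1 seq2 i 1 := by
  subst hx
  rw [pv_allPos_one seq1 seq2 i h]
  rw [pv_whileB_eq_chain seq1 seq2 i (seq1.length - (i + 1)) 1 res (le_refl 1) (by omega) rfl]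
  congr 1
  conv_rhs => rw [pvChain]
  by_cases hinf : pvPref seq1 i 1 <:+: seq2 <;> by_cases h3 : i + 1 < seq1.length <;>
    simp [hinf, h3]

lemma pv_index?_getD (l : List Int) (n : Int) (h : n ∈ l) :
    (PySem.List.index? l n).getD 0 = l.idxOf n := by
  induction l with
  | nil => simp at h
  | cons a l ih =>
    by_cases ha : a = n
    · subst ha; rw [PySem.List.index?_cons_self]; simp
    · rw [PySem.List.index?_cons_of_ne l ha, List.idxOf_cons_ne l ha]
      have hm : n ∈ l := by
        rcases List.mem_cons.mp h with h' | h'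
        · exact absurd h'.symm ha
        · exact h'
      obtain ⟨k, hk⟩ := Option.isSome_iff_exists.mp ((PySem.List.index?_isSome_iff l n).mpr hm)
      have hik := ih hm
      rw [hk] at hik ⊢
      simp at hik ⊢
      omega

lemma pv_idxOf_append_cons {pre t : List Int} {n : Int} (h : n ∉ pre) :
    (pre ++ n :: t).idxOf n = pre.length := by
  induction pre with
  | nil => simp
  | cons a pre ih =>
    have ha : a ≠ n := fun e => h (by simp [e])
    rw [List.cons_append, List.idxOf_cons_ne _ ha, ih (fun hm => h (List.mem_cons_of_mem a hm))]
    simp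

lemma pv_chunksA (seq1 seq2 : List Int) (n : Int) (hn : n ∈ seq1) :
    pvWhileA seq1 seq2 [n] ((PySem.List.index? seq1 n).getD 0) [] = pvChain seq1 seq2 (seq1.idxOf n) 1 := by
  rw [pv_index?_getD seq1 n hn]
  have hlt := List.idxOf_lt_length_of_mem hn
  have h1 : [n] = pvPref seq1 (seq1.idxOf n) 1 := by rw [pv_pref_one hlt, List.getElem_idxOf hlt]
  rw [h1]
  have := pv_whileA_eq_chain seq1 seq2 (seq1.idxOf n) (seq1.length - (seq1.idxOf n + 1)) 1 [] (le_refl 1) (by omega) rfl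
  rw [show seq1.idxOf n + 1 - 1 = seq1.idxOf n from by omega] at this
  simpa using this

lemma pv_merge_fresh (l : List (List Int)) : ∀ ms, l.Nodup → (∀ c ∈ l, 0 < c.length ∧ c ∉ ms) →
    l.foldl (fun ms chunk => if decide (0 < chunk.length) && !(ms.contains chunk) then ms ++ [chunk] else ms) ms = ms ++ l := by
  induction l with
  | nil => intro ms _ _; simp
  | cons c l ih =>
    intro ms hnd hall
    rw [List.foldl_cons]
    have h1 := hall c (List.mem_cons_self ..)
    rw [if_pos (by simp [h1.1, h1.2])]
    rw [ih (ms ++ [c]) hnd.of_cons ?_]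
    · simp
    · intro c' hc'
      refine ⟨(hall c' (List.mem_cons_of_mem c hc')).1, ?_⟩
      simp only [List.mem_append, List.mem_singleton]
      rintro (hin | rfl)
      · exact (hall c' (List.mem_cons_of_mem c hc')).2 hin
      · exact (List.nodup_cons.mp hnd).1 hc'

lemma pv_merge_dup (l : List (List Int)) : ∀ ms, (∀ c ∈ l, c ∈ ms) →
    l.foldl (fun ms chunk => if decide (0 < chunk.length) && !(ms.contains chunk) then ms ++ [chunk] else ms) ms = ms := by
  induction l with
  | nil => intro ms _; rfl
  | cons c l ih =>
    intro ms hall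
    rw [List.foldl_cons, if_neg (by simp [hall c (List.mem_cons_self ..)])]
    exact ih ms (fun c' hc' => hall c' (List.mem_cons_of_mem c hc'))

lemma pv_outer (seq1 seq2 : List Int) :
    ∀ (t pre : List Int) (seen : PySem.Set Int) (res : List (List Int)),
    seq1 = pre ++ t →
    (∀ v : Int, PySem.Set.contains seen v = decide (v ∈ pre)) →
    (∀ c ∈ res, ∃ v ∈ pre, c.head? = some v) →
    (∀ v ∈ pre, ∀ c ∈ pvChain seq1 seq2 (seq1.idxOf v) 1, c ∈ res) →
    t.foldl (fun minedSeqs n =>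
      let indHelper := (PySem.List.index? seq1 n).getD 0
      let chunks := pvWhileA seq1 seq2 [n] indHelper []
      chunks.foldl (fun ms chunk =>
        if decide (0 < chunk.length) && !(ms.contains chunk) then ms ++ [chunk] else ms) minedSeqs) res =
    ((PySem.List.enumerate t (pre.length : Int)).foldl (fun (st : PySem.Set Int × List (List Int)) ix =>
      if PySem.Set.contains st.1 ix.2 then st
      else
        let positions := ((PySem.List.enumerate seq2).filter (fun pv => pv.2 == ix.2)).map (fun pv => pv.1)
        (PySem.Set.add st.1 ix.2, pvWhileB seq1 seq2 ix.1 1 positions st.2))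
      (seen, res)).2 := by
  intro t
  induction t with
  | nil =>
    intro pre seen res hsplit hseen hheads hsub
    simp [PySem.List.enumerate_nil]
  | cons n t iht =>
    intro pre seen res hsplit hseen hheads hsub
    rw [PySem.List.enumerate_cons, List.foldl_cons, List.foldl_cons]
    simp only
    rw [pv_chunksA seq1 seq2 n (by rw [hsplit]; simp)]
    by_cases hmem : n ∈ pre
    · rw [pv_merge_dup _ res (hsub n hmem)]
      have hc : PySem.Set.contains seen n = true := by rw [hseen]; simp [hmem]
      rw [if_pos hc]
      have hlen : ((pre ++ [n]).length : Int) = (pre.length : Int) + 1 := by simp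
      have := iht (pre ++ [n]) seen res
        (by rw [hsplit]; simp)
        (by
          intro v
          rw [hseen, decide_eq_decide]
          constructor
          · intro hv; exact List.mem_append.mpr (Or.inl hv)
          · intro hv
            rcases List.mem_append.mp hv with hv | hv
            · exact hv
            · have hv' : v = n := by simpa using hv
              subst hv'; exact hmem)
        (fun c hc' => by
          obtain ⟨v, hv, he⟩ := hheads c hc'
          exact ⟨v, List.mem_append.mpr (Or.inl hv), he⟩)
        (by
          intro v hv
          rcases List.mem_append.mp hv with hv | hv
          · exact hsub v hv
          · have hv' : v = n := by simpa using hv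
            subst hv'; exact hsub v hmem)
      rw [hlen] at this
      exact this
    · have hidx : seq1.idxOf n = pre.length := by rw [hsplit]; exact pv_idxOf_append_cons hmem
      have hlen1 : pre.length < seq1.length := by rw [hsplit]; simp
      have hget : seq1[pre.length]'hlen1 = n := by
        subst hsplit
        rw [List.getElem_append_right (Nat.le_refl pre.length)]
        simp
      rw [hidx]
      have hfacts := pv_chain_facts seq1 seq2 pre.length (seq1.length - (pre.length + 1)) 1
        (le_refl 1) (by omega) rfl
      have hgetD : seq1.getD pre.length 0 = n := by rw [List.getD_eq_getElem _ _ hlen1, hget]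
      rw [pv_merge_fresh _ res (pv_chain_nodup seq1 seq2 pre.length (seq1.length - (pre.length + 1)) 1 (le_refl 1) (by omega) rfl) ?_]
      · have hc : PySem.Set.contains seen n = false := by rw [hseen]; simp [hmem]
        have hnot : n ∉ seen := fun hin => by
          have htrue := (PySem.Set.contains_iff seen n).mpr hin
          rw [hc] at htrue
          exact Bool.false_ne_true htrue
        rw [if_neg (by simp [hnot])]
        rw [pv_chunksB seq1 seq2 pre.length hlen1 n hget res]
        have hlen : ((pre ++ [n]).length : Int) = (pre.length : Int) + 1 := by simp
        have := iht (pre ++ [n]) (PySem.Set.add seen n) (res ++ pvChain seq1 seq2 pre.length 1)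
          (by rw [hsplit]; simp)
          (by
            intro v
            have hiff : v ∈ PySem.Set.add seen n ↔ v ∈ pre ∨ v = n := by
              rw [PySem.Set.mem_add]
              constructor
              · rintro (hv | rfl)
                · refine Or.inl ?_
                  have h1 := (PySem.Set.contains_iff seen v).mpr hv
                  rw [hseen v] at h1
                  exact of_decide_eq_true h1
                · exact Or.inr rfl
              · rintro (hv | rfl)
                · refine Or.inl ((PySem.Set.contains_iff seen v).mp ?_)
                  rw [hseen v]
                  exact decide_eq_true hv
                · exact Or.inr rfl
            rw [Bool.eq_iff_iff, PySem.Set.contains_iff, decide_eq_true_eq, hiff]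
            simp)
          (by
            intro c hc'
            rcases List.mem_append.mp hc' with hc' | hc'
            · obtain ⟨v, hv, he⟩ := hheads c hc'
              exact ⟨v, List.mem_append.mpr (Or.inl hv), he⟩
            · refine ⟨n, by simp, ?_⟩
              rw [(hfacts c hc').1, hgetD])
          (by
            intro v hv
            rcases List.mem_append.mp hv with hv | hv
            · exact fun c hc' => List.mem_append.mpr (Or.inl (hsub v hv c hc'))
            · simp only [List.mem_singleton] at hv
              subst hv
              rw [hidx]
              exact fun c hc' => List.mem_append.mpr (Or.inr hc'))
        rw [hlen] at this
        exact this
      · intro c hc'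
        refine ⟨by have := (hfacts c hc').2.1; omega, fun hin => ?_⟩
        obtain ⟨v, hv, he⟩ := hheads c hin
        rw [(hfacts c hc').1, hgetD] at he
        have : v = n := by injection he.symm
        subst this
        exact hmem hv

-- ===== VERDICT (by name: the statement is the Claim_ definition above) =====
theorem seqMining_spec : Claim_equal_seqMining := by
  intro seq1 seq2 _
  unfold Spec_seqMining seqMining seqMining_alt
  have h := pv_outer seq1 seq2 seq1 [] PySem.Set.empty []
    (by simp) (by intro v; simp [PySem.Set.contains, PySem.Set.empty]) (by simp) (by simp)
  simpa using h
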